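-- pv_equiv track=rewrite | github.com/jiarong0907/RouterArena | llm_evaluation/utils.py | escape_format_braces
-- ===== SOURCE A (Python) =====
-- def escape_format_braces(text):
--     """
--     Escape curly braces in input text to prevent them from being interpreted
--     as format variables when using str.format().
--
--     Args:
--         text (str): Input text that may contain curly braces
--
--     Returns:
--         str: Text with curly braces properly escaped for format strings
--
--     Example:
--         escape_format_braces("Find {x-2} and {k^3}") -> "Find {{x-2}} and {{k^3}}"
--     """
--     if not isinstance(text, str):
--         return text
--
--     # Replace single { with {{ and single } with }}
--     # But preserve already escaped braces ({{ and }})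
--     result = ""
--     i = 0
--     while i < len(text):
--         if text[i] == "{":
--             if i + 1 < len(text) and text[i + 1] == "{":
--                 # Already escaped, keep as is
--                 result += "{{"
--                 i += 2
--             else:
--                 # Single brace, escape it
--                 result += "{{"
--                 i += 1
--         elif text[i] == "}":
--             if i + 1 < len(text) and text[i + 1] == "}":
--                 # Already escaped, keep as is
--                 result += "}}"
--                 i += 2
--             else:
--                 # Single brace, escape it
--                 result += "}}"
--                 i += 1
--         else:
--             result += text[i]
--             i += 1
--
--     return result
-- ===== SOURCE B (Python) =====
-- def escape_format_braces(text):
--     if not isinstance(text, str):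
--         return text
--     parts = []
--     i = 0
--     n = len(text)
--     while i < n:
--         ch = text[i]
--         j = i
--         while j < n and text[j] == ch:
--             j += 1
--         run = j - i
--         if ch in "{}":
--             parts.append(ch * (run + run % 2))
--         else:
--             parts.append(text[i:j])
--         i = j
--     return "".join(parts)
-- ===== Notes on version B (the rewrite author's own statement) =====
-- stated objective: faster
-- what changed: Replaces A's index walk with two-brace lookahead and per-char string concatenation by a run-length scan: each maximal run of identical characters is consumed at once, brace runs of length n emit n + n%2 braces (the parity closed form of A's pairwise consumption), and pieces are joined once.
import Mathlib
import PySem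

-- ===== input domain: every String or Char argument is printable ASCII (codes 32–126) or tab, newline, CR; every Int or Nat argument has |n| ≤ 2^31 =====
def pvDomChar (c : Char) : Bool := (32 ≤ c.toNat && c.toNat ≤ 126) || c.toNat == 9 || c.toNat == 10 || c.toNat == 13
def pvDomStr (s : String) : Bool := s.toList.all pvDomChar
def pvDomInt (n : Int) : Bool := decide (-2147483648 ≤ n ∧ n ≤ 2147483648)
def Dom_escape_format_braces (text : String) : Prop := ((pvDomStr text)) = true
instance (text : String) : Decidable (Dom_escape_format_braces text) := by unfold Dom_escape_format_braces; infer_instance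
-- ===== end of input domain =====

-- ===== PORT A =====
-- B changes A's char-by-char lookahead walk to a run-length scan (alternative decomposition; same behaviour).
-- A's while-loop: on '{' or '}' look one ahead; consume two identical braces (emit doubled) or one (emit doubled).
def aLoop : List Char → List Char
  | [] => []
  | '{' :: '{' :: rest => '{' :: '{' :: aLoop rest
  | '{' :: rest => '{' :: '{' :: aLoop rest
  | '}' :: '}' :: rest => '}' :: '}' :: aLoop rest
  | '}' :: rest => '}' :: '}' :: aLoop rest
  | c :: rest => c :: aLoop rest

def escape_format_braces (text : String) : String := String.ofList (aLoop text.toList)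

-- ===== PORT B =====
-- B's outer loop: take the maximal run of the leading character; brace runs of length n become n + n % 2 copies.
def bLoop : List Char → List Char
  | [] => []
  | c :: rest =>
    let run := 1 + (rest.takeWhile (· == c)).length
    (if c = '{' ∨ c = '}' then List.replicate (run + run % 2) c else List.replicate run c)
      ++ bLoop (rest.dropWhile (· == c))
termination_by l => l.length
decreasing_by simp; exact List.length_dropWhile_le _ _

def escape_format_braces_alt (text : String) : String := String.ofList (bLoop text.toList)

-- ===== PRECONDITION & SPEC =====
def Spec_escape_format_braces (text : String) (out : String) : Prop := out = escape_format_braces_alt text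
instance (text : String) (out : String) : Decidable (Spec_escape_format_braces text out) := by unfold Spec_escape_format_braces; infer_instance

-- ===== CLAIM (what is proved, stated in full; the proofs are below) =====
def Claim_equal_escape_format_braces : Prop := ∀ (text : String), Dom_escape_format_braces text → Spec_escape_format_braces text (escape_format_braces text)

-- ===== LEMMAS AND PROOFS =====

theorem head?_dropWhile_not {α : Type} (p : α → Bool) :
    ∀ (l : List α) (d : α), (l.dropWhile p).head? = some d → p d = false := by
  intro l
  induction l with
  | nil => intro d h; simp at h
  | cons a l ih =>
    intro d h
    by_cases hp : p a
    · rw [List.dropWhile_cons_of_pos hp] at h; exact ih d h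
    · rw [List.dropWhile_cons_of_neg hp] at h
      simp at h
      rw [← h]; exact Bool.of_not_eq_true hp

theorem takeWhile_beq_eq_replicate {c : Char} (l : List Char) :
    l.takeWhile (· == c) = List.replicate (l.takeWhile (· == c)).length c := by
  rw [List.eq_replicate_iff]
  refine ⟨rfl, ?_⟩
  intro b hb
  have := List.mem_takeWhile_imp hb
  simpa using this

theorem aLoop_cons_nonbrace {c : Char} (h1 : c ≠ '{') (h2 : c ≠ '}') (l : List Char) :
    aLoop (c :: l) = c :: aLoop l := by
  cases l with
  | nil => simp [aLoop]
  | cons d r => simp [aLoop, h1, h2]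

theorem aLoop_nonbrace_run {c : Char} (h1 : c ≠ '{') (h2 : c ≠ '}') :
    ∀ (n : Nat) (rest : List Char),
      aLoop (List.replicate n c ++ rest) = List.replicate n c ++ aLoop rest := by
  intro n
  induction n with
  | zero => intro rest; simp
  | succ m ih =>
    intro rest
    rw [List.replicate_succ, List.cons_append, aLoop_cons_nonbrace h1 h2, ih, List.cons_append]

theorem aLoop_cons_single {c : Char} (hc : c = '{' ∨ c = '}') (rest : List Char)
    (h : ∀ d, rest.head? = some d → d ≠ c) :
    aLoop (c :: rest) = c :: c :: aLoop rest := by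
  rcases hc with hc | hc <;> subst hc <;>
  · cases rest with
    | nil => simp [aLoop]
    | cons d r =>
      have hd : d ≠ _ := h d rfl
      simp [aLoop, hd]

theorem aLoop_brace_run {c : Char} (hc : c = '{' ∨ c = '}') :
    ∀ (n : Nat) (rest : List Char),
      (∀ d, rest.head? = some d → d ≠ c) →
      aLoop (List.replicate n c ++ rest) = List.replicate (n + n % 2) c ++ aLoop rest := by
  intro n
  induction n using Nat.strong_induction_on with
  | _ n ih =>
    match n with
    | 0 => intro rest h; simp
    | 1 =>
      intro rest h
      simpa [List.replicate] using aLoop_cons_single hc rest h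
    | Nat.succ (Nat.succ m) =>
      intro rest h
      have h2 : aLoop (List.replicate m c ++ rest) = List.replicate (m + m % 2) c ++ aLoop rest :=
        ih m (by omega) rest h
      have hpair : aLoop (c :: c :: (List.replicate m c ++ rest))
          = c :: c :: aLoop (List.replicate m c ++ rest) := by
        rcases hc with hc | hc <;> subst hc <;> simp [aLoop]
      have hmod : m + 2 + (m + 2) % 2 = (m + m % 2) + 2 := by omega
      calc aLoop (List.replicate (m + 2) c ++ rest)
          = aLoop (c :: c :: (List.replicate m c ++ rest)) := by
            rw [List.replicate_succ, List.replicate_succ]; rfl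
        _ = c :: c :: (List.replicate (m + m % 2) c ++ aLoop rest) := by rw [hpair, h2]
        _ = List.replicate (m + 2 + (m + 2) % 2) c ++ aLoop rest := by
            rw [hmod, List.replicate_succ, List.replicate_succ]; rfl

theorem aLoop_eq_bLoop (l : List Char) : aLoop l = bLoop l := by
  cases l with
  | nil => simp [aLoop, bLoop]
  | cons c rest =>
    have hlt : (rest.dropWhile (· == c)).length < (c :: rest).length :=
      Nat.lt_succ_of_le (List.length_dropWhile_le _ _)
    have ih : aLoop (rest.dropWhile (· == c)) = bLoop (rest.dropWhile (· == c)) :=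
      aLoop_eq_bLoop (rest.dropWhile (· == c))
    have hsplit : c :: rest
        = List.replicate ((rest.takeWhile (· == c)).length + 1) c ++ rest.dropWhile (· == c) := by
      conv_lhs => rw [← List.takeWhile_append_dropWhile (p := (· == c)) (l := rest),
        takeWhile_beq_eq_replicate]
      rw [List.replicate_succ, List.cons_append]
    have htail : ∀ d, (rest.dropWhile (· == c)).head? = some d → d ≠ c := by
      intro d hd
      have := head?_dropWhile_not (· == c) rest d hd
      simpa using this
    rw [bLoop]
    by_cases hb : c = '{' ∨ c = '}'
    · rw [hsplit, aLoop_brace_run hb _ _ htail, ih, if_pos hb]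
      have : (rest.takeWhile (· == c)).length + 1
          = 1 + (rest.takeWhile (fun x => x == c)).length := by omega
      rw [this]
    · rw [hsplit]
      push Not at hb
      rw [aLoop_nonbrace_run hb.1 hb.2, ih, if_neg]
      · have : (rest.takeWhile (· == c)).length + 1
            = 1 + (rest.takeWhile (fun x => x == c)).length := by omega
        rw [this]
      · push Not
        exact hb
termination_by l.length
decreasing_by simp; exact List.length_dropWhile_le _ _

theorem escape_format_braces_spec : Claim_equal_escape_format_braces := by
  intro text _
  unfold Spec_escape_format_braces escape_format_braces escape_format_braces_alt
  rw [aLoop_eq_bLoop]
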